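-- pv_equiv track=rewrite | github.com/benquick123/code-profiling | code/batch-2/vse-naloge-brez-testov/DN7-M-003.py | dolzina_poti
-- ===== SOURCE A (Python) =====
-- def dolzina_poti(pot):
--     koraki = 0
--     pot_x, pot_y = [], []
--     if pot:
--         for x, y in pot:
--             pot_x.append(x), pot_y.append(y)
--         current_x, current_y = pot_x[0], pot_y[0]
--         for x1 in pot_x:
--             if x1 != current_x:
--                 koraki += abs(current_x - x1)
--                 current_x = x1
--         for y1 in pot_y:
--             if y1 != current_y:
--                 koraki += abs(current_y - y1)
--                 current_y = y1
--     return koraki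
-- ===== SOURCE B (Python) =====
-- def dolzina_poti(pot):
--     return sum(abs(x2 - x1) + abs(y2 - y1)
--                for (x1, y1), (x2, y2) in zip(pot, pot[1:]))
-- ===== Notes on version B (the rewrite author's own statement) =====
-- stated objective: simpler
-- what changed: One pairwise pass over zip(pot, pot[1:]) summing |dx|+|dy| per step, instead of building separate x/y coordinate lists and scanning each with a 'current' tracker in three passes.
import Mathlib
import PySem

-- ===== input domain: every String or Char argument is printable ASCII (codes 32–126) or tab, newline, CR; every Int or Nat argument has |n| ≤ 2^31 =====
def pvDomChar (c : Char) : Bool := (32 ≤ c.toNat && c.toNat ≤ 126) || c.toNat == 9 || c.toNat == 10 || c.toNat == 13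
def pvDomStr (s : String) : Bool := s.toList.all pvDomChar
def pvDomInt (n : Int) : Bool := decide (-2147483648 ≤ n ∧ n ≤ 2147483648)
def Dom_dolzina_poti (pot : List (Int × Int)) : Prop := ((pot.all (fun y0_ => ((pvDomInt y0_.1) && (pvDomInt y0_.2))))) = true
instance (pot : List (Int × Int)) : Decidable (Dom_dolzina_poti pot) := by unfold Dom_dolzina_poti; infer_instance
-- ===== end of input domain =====

-- B is simpler: one pairwise pass over zip(pot, pot.tail) summing |dx|+|dy|, instead of
-- A's three passes (build pot_x/pot_y, then scan each axis with a 'current' tracker).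

-- ===== PORT A =====
-- A's per-axis scan: state (current, koraki); skip equal neighbours, otherwise add |current - x1|.
def pvAxisScan (l : List Int) (cur koraki : Int) : Int × Int :=
  l.foldl (fun s x1 => if x1 ≠ s.1 then (x1, s.2 + |s.1 - x1|) else s) (cur, koraki)

def dolzina_poti (pot : List (Int × Int)) : Int :=
  match pot with
  | [] => 0            -- `if pot:` false: koraki stays 0
  | _ :: _ =>
    let pxy := pot.foldl (fun (s : List Int × List Int) p => (s.1 ++ [p.1], s.2 ++ [p.2])) ([], [])
    let current_x := pxy.1.headD 0   -- pot_x[0]; pot nonempty so head exists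
    let current_y := pxy.2.headD 0   -- pot_y[0]
    let s1 := pvAxisScan pxy.1 current_x 0
    let s2 := pvAxisScan pxy.2 current_y s1.2
    s2.2

-- ===== PORT B =====
def dolzina_poti_alt (pot : List (Int × Int)) : Int :=
  (pot.zip pot.tail).foldl (fun acc pq => acc + |pq.2.1 - pq.1.1| + |pq.2.2 - pq.1.2|) 0

-- ===== PRECONDITION & SPEC =====
def Spec_dolzina_poti (pot : List (Int × Int)) (out : Int) : Prop := out = dolzina_poti_alt pot
instance (pot : List (Int × Int)) (out : Int) : Decidable (Spec_dolzina_poti pot out) := by unfold Spec_dolzina_poti; infer_instance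

-- ===== CLAIM (what is proved, stated in full; the proofs are below) =====
def Claim_equal_dolzina_poti : Prop := ∀ (pot : List (Int × Int)), Dom_dolzina_poti pot → Spec_dolzina_poti pot (dolzina_poti pot)

-- ===== LEMMAS AND PROOFS =====

-- total absolute variation along a single axis, head-first form
def pvD (cur : Int) : List Int → Int
  | [] => 0
  | x :: xs => |cur - x| + pvD x xs

theorem pvAxisScan_snd (l : List Int) (cur koraki : Int) :
    (pvAxisScan l cur koraki).2 = koraki + pvD cur l := by
  induction l generalizing cur koraki with
  | nil => simp [pvAxisScan, pvD]
  | cons x xs ih =>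
    simp only [pvAxisScan, List.foldl_cons, pvD]
    by_cases h : x = cur
    · subst h
      simpa [pvAxisScan] using ih x koraki
    · rw [if_pos h]
      simpa [pvAxisScan, add_assoc] using ih x (koraki + |cur - x|)

theorem pvFoldPair (pot : List (Int × Int)) (a b : List Int) :
    pot.foldl (fun (s : List Int × List Int) p => (s.1 ++ [p.1], s.2 ++ [p.2])) (a, b)
      = (a ++ pot.map Prod.fst, b ++ pot.map Prod.snd) := by
  induction pot generalizing a b with
  | nil => simp
  | cons p ps ih => simp [ih, List.append_assoc]

theorem pvAlt_eq (ps : List (Int × Int)) (x y acc : Int) :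
    (((x, y) :: ps).zip ps).foldl
        (fun acc pq => acc + |pq.2.1 - pq.1.1| + |pq.2.2 - pq.1.2|) acc
      = acc + pvD x (ps.map Prod.fst) + pvD y (ps.map Prod.snd) := by
  induction ps generalizing x y acc with
  | nil => simp [pvD]
  | cons q qs ih =>
    simp only [List.zip_cons_cons, List.foldl_cons, List.map_cons, pvD]
    rw [ih]
    have h1 : |q.1 - x| = |x - q.1| := abs_sub_comm _ _
    have h2 : |q.2 - y| = |y - q.2| := abs_sub_comm _ _
    rw [h1, h2]; ring

-- ===== VERDICT (by name: the statement is the Claim_ definition above) =====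
theorem dolzina_poti_spec : Claim_equal_dolzina_poti := by
  intro pot _
  unfold Spec_dolzina_poti
  cases pot with
  | nil => rfl
  | cons p ps =>
    obtain ⟨x, y⟩ := p
    simp only [dolzina_poti, dolzina_poti_alt, List.tail_cons]
    rw [show ((x, y) :: ps).foldl (fun (s : List Int × List Int) p => (s.1 ++ [p.1], s.2 ++ [p.2])) ([], [])
          = ([] ++ ((x, y) :: ps).map Prod.fst, [] ++ ((x, y) :: ps).map Prod.snd) from pvFoldPair _ [] []]
    simp only [List.nil_append, List.map_cons, List.headD_cons]
    rw [pvAxisScan_snd, pvAxisScan_snd, pvAlt_eq]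
    simp [pvD]
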